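-- pv_equiv track=rewrite | github.com/lucasotavio1/exercicios-tedstp | beecrowd/1024/1024.py | criptografar
-- ===== SOURCE A (Python) =====
-- def criptografar(msg):
--     primeira_passada = []
--     for char in msg:
--         if 'a' <= char <= 'z':
--             primeira_passada.append(chr(ord(char) + 3))
--         elif 'A' <= char <= 'Z':
--             primeira_passada.append(chr(ord(char) + 3))
--         else:
--             primeira_passada.append(char)
--     segunda_passada = ''.join(primeira_passada)[::-1]
--
--     metade = len(segunda_passada) // 2
--
--     resultado = []
--
--     for i in range(len(segunda_passada)):
--         char = segunda_passada[i]
--         if i >= metade and ('a' <= char <= 'z' or 'A' <= char <= 'Z'):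
--             resultado.append(chr(ord(char) - 1))
--         else:
--             resultado.append(char)
--     return ''.join(resultado)
-- ===== SOURCE B (Python) =====
-- def criptografar(msg):
--     n = len(msg)
--     h = n // 2
--     def enc(i):
--         c = msg[n - 1 - i]
--         s = chr(ord(c) + 3) if ('a' <= c <= 'z' or 'A' <= c <= 'Z') else c
--         if i >= h and ('a' <= s <= 'z' or 'A' <= s <= 'Z'):
--             s = chr(ord(s) - 1)
--         return s
--     return ''.join(enc(i) for i in range(n))
-- ===== Notes on version B (the rewrite author's own statement) =====
-- stated objective: simpler
-- what changed: Replaces A's three sequential passes (shift letters into a list, join+reverse, second pass unshifting the second half) with one comprehension that computes each output character directly from msg[n-1-i] via index arithmetic, with no intermediate reversed string.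
import Mathlib
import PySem

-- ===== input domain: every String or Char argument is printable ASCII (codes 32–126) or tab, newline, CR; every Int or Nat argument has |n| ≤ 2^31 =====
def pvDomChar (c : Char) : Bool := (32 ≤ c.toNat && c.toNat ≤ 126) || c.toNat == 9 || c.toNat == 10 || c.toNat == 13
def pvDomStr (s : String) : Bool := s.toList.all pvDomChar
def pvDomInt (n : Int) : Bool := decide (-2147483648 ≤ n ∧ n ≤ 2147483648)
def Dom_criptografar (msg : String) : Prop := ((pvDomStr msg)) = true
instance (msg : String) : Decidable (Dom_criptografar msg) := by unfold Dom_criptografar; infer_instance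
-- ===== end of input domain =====

-- B fuses A's three sequential passes (shift, reverse, second-half unshift) into one
-- index-driven pass computing each output character directly; objective: simpler, same O(n) cost.

-- ===== PORT A =====
-- first loop body: the three branches of A's if/elif/else
def pvShiftA (ch : Char) : Char :=
  if 'a' ≤ ch ∧ ch ≤ 'z' then Char.ofNat (ch.toNat + 3)
  else if 'A' ≤ ch ∧ ch ≤ 'Z' then Char.ofNat (ch.toNat + 3)
  else ch

def criptografar (msg : String) : String :=
  let primeira_passada := msg.toList.foldl (fun acc ch => acc ++ [pvShiftA ch]) []
  let segunda_passada := primeira_passada.reverse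
  let metade := segunda_passada.length / 2
  let resultado := (List.range segunda_passada.length).foldl (fun acc i =>
    let ch := segunda_passada.getD i ' '   -- in-range index, default never read
    acc ++ [if metade ≤ i ∧ (('a' ≤ ch ∧ ch ≤ 'z') ∨ ('A' ≤ ch ∧ ch ≤ 'Z'))
            then Char.ofNat (ch.toNat - 1) else ch]) []
  String.mk resultado

-- ===== PORT B =====
-- enc(i) from Source B: output character at position i, computed directly
def pvEncB (cs : List Char) (n h i : Nat) : Char :=
  let c := cs.getD (n - 1 - i) ' '   -- in-range index, default never read
  let s := if ('a' ≤ c ∧ c ≤ 'z') ∨ ('A' ≤ c ∧ c ≤ 'Z') then Char.ofNat (c.toNat + 3) else c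
  if h ≤ i ∧ (('a' ≤ s ∧ s ≤ 'z') ∨ ('A' ≤ s ∧ s ≤ 'Z')) then Char.ofNat (s.toNat - 1) else s

def criptografar_alt (msg : String) : String :=
  let cs := msg.toList
  let n := cs.length
  let h := n / 2
  String.mk ((List.range n).map (pvEncB cs n h))

-- ===== PRECONDITION & SPEC =====
def Spec_criptografar (msg : String) (out : String) : Prop := out = criptografar_alt msg
instance (msg : String) (out : String) : Decidable (Spec_criptografar msg out) := by unfold Spec_criptografar; infer_instance

-- ===== CLAIM (what is proved, stated in full; the proofs are below) =====
def Claim_equal_criptografar : Prop := ∀ (msg : String), Dom_criptografar msg → Spec_criptografar msg (criptografar msg)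

-- ===== LEMMAS AND PROOFS =====
-- pointwise agreement of the two per-index character computations
theorem pv_pointwise (cs : List Char) (i : Nat) (hi : i < cs.length) :
    (let ch := ((cs.map pvShiftA).reverse).getD i ' '
     if cs.length / 2 ≤ i ∧ (('a' ≤ ch ∧ ch ≤ 'z') ∨ ('A' ≤ ch ∧ ch ≤ 'Z'))
     then Char.ofNat (ch.toNat - 1) else ch)
    = pvEncB cs cs.length (cs.length / 2) i := by
  have hlen : ((cs.map pvShiftA).reverse).length = cs.length := by simp
  have hidx : cs.length - 1 - i < cs.length := by omega
  have hch : ((cs.map pvShiftA).reverse).getD i ' ' = pvShiftA (cs.getD (cs.length - 1 - i) ' ') := by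
    rw [List.getD_eq_getElem _ _ (by simpa [hlen] using hi),
        List.getD_eq_getElem _ _ hidx, List.getElem_reverse]
    simp
  have hsh : ∀ c : Char, pvShiftA c =
      (if ('a' ≤ c ∧ c ≤ 'z') ∨ ('A' ≤ c ∧ c ≤ 'Z') then Char.ofNat (c.toNat + 3) else c) := by
    intro c; unfold pvShiftA; split_ifs <;> tauto
  simp only [hch, pvEncB, hsh]

theorem criptografar_spec : Claim_equal_criptografar := by
  intro msg _
  unfold Spec_criptografar criptografar criptografar_alt
  simp only [PySem.List.foldl_append_singleton_eq_map, List.nil_append,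
             List.length_reverse, List.length_map]
  congr 1
  exact List.map_congr_left (fun i hi => pv_pointwise msg.toList i (List.mem_range.mp hi))
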